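-- pv_equiv track=rewrite | github.com/DeepRCL/ProtoTTA | ProtoPFormer/generate_dogs_report.py | rank_methods
-- ===== SOURCE A (Python) =====
-- def rank_methods(cell_values):
--     valid = [(m, v) for m, v in cell_values.items() if v is not None]
--     if len(valid) < 2:
--         return {m: "" for m in cell_values}
--     ordered = sorted(valid, key=lambda x: x[1], reverse=True)
--     best = ordered[0][0]
--     second = ordered[1][0]
--     marks = {m: "" for m in cell_values}
--     marks[best] = "best"
--     marks[second] = "second"
--     return marks
-- ===== SOURCE B (Python) =====
-- def rank_methods(cell_values):
--     valid = [(m, v) for m, v in cell_values.items() if v is not None]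
--     if len(valid) < 2:
--         return {m: "" for m in cell_values}
--     best = second = None
--     for m, v in valid:
--         if best is None or v > best[1]:
--             best, second = (m, v), best
--         elif second is None or v > second[1]:
--             second = (m, v)
--     marks = {m: "" for m in cell_values}
--     marks[best[0]] = "best"
--     marks[second[0]] = "second"
--     return marks
-- ===== Notes on version B (the rewrite author's own statement) =====
-- stated objective: alternative
-- what changed: Replaces the full reverse sort of the valid pairs with a single linear pass that maintains the best and second-best (method, value) pairs, using strict > so ties keep the earlier method exactly as the stable reverse sort does.
import Mathlib
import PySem

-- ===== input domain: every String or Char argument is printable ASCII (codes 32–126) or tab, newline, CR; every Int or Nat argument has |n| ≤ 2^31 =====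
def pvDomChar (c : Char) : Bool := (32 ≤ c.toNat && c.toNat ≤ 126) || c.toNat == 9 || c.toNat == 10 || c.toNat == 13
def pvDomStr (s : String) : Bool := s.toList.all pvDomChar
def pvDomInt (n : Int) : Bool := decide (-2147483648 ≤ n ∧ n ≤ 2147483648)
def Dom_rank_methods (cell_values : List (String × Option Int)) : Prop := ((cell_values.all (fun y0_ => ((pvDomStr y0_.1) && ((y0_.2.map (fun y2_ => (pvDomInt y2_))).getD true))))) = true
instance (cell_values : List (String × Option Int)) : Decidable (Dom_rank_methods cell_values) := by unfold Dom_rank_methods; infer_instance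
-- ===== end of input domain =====

-- B replaces A's full reverse sort by one linear pass keeping only the top-two (method, value) pairs.

-- ===== PORT A =====
-- valid = [(m, v) for m, v in cell_values.items() if v is not None]   (shared by both ports; identical in Source A and Source B)
def pvValid (cell_values : List (String × Option Int)) : List (String × Int) :=
  cell_values.filterMap (fun p => p.2.map (fun v => (p.1, v)))

-- marks = {m: "" for m in cell_values}   (shared by both ports; identical in Source A and Source B)
def pvBlank (cell_values : List (String × Option Int)) : PySem.Dict String String :=
  cell_values.foldl (fun d p => d.insert p.1 "") PySem.Dict.empty

def rank_methods (cell_values : List (String × Option Int)) : List (String × String) :=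
  let valid := pvValid cell_values
  if valid.length < 2 then (pvBlank cell_values).items
  else
    let ordered := PySem.List.sorted valid (fun x => x.2) true
    match ordered with
    | b :: s :: _ => (((pvBlank cell_values).insert b.1 "best").insert s.1 "second").items
    | _ => []  -- unreachable: ordered has the same length as valid, ≥ 2

-- ===== PORT B =====
-- one step of B's loop over the valid pairs, state = (best, second)
def pvStep (st : Option (String × Int) × Option (String × Int)) (x : String × Int) :
    Option (String × Int) × Option (String × Int) :=
  match st with
  | (none, _) => (some x, none)
  | (some b, s) =>
    if b.2 < x.2 then (some x, some b)
    else
      match s with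
      | none => (some b, some x)
      | some c => if c.2 < x.2 then (some b, some x) else (some b, some c)

def rank_methods_alt (cell_values : List (String × Option Int)) : List (String × String) :=
  let valid := pvValid cell_values
  if valid.length < 2 then (pvBlank cell_values).items
  else
    match valid.foldl pvStep (none, none) with
    | (some b, some s) => (((pvBlank cell_values).insert b.1 "best").insert s.1 "second").items
    | _ => []  -- unreachable: with ≥ 2 valid pairs the loop ends with both set

-- ===== PRECONDITION & SPEC =====
def Spec_rank_methods (cell_values : List (String × Option Int)) (out : List (String × String)) : Prop := out = rank_methods_alt cell_values
instance (cell_values : List (String × Option Int)) (out : List (String × String)) : Decidable (Spec_rank_methods cell_values out) := by unfold Spec_rank_methods; infer_instance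

-- ===== CLAIM (what is proved, stated in full; the proofs are below) =====
def Claim_equal_rank_methods : Prop := ∀ (cell_values : List (String × Option Int)), Dom_rank_methods cell_values → Spec_rank_methods cell_values (rank_methods cell_values)

-- ===== LEMMAS AND PROOFS =====

-- the first two elements of a list, as B's loop state
def pvFirst2 (l : List (String × Int)) : Option (String × Int) × Option (String × Int) :=
  (l[0]?, l[1]?)

-- inserting x into the (reverse-)sorted accumulator changes its first two elements exactly as B's step does
theorem pvFirst2_insertBy (acc : List (String × Int)) (x : String × Int) :
    pvFirst2 (PySem.List.insertBy (fun a b => decide ((b.2 : Int) < a.2)) x acc)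
      = pvStep (pvFirst2 acc) x := by
  match acc with
  | [] => simp [PySem.List.insertBy, pvFirst2, pvStep]
  | [a] =>
    by_cases h : (a.2 : Int) < x.2 <;>
      simp [PySem.List.insertBy, pvFirst2, pvStep, h]
  | a :: b :: t =>
    by_cases h : (a.2 : Int) < x.2
    · simp [PySem.List.insertBy, pvFirst2, pvStep, h]
    · by_cases h2 : (b.2 : Int) < x.2 <;>
        simp [PySem.List.insertBy, pvFirst2, pvStep, h, h2]

theorem pvFold_first2 (vs : List (String × Int)) (acc : List (String × Int)) :
    pvFirst2 (vs.foldl (fun a x => PySem.List.insertBy (fun a b => decide ((b.2 : Int) < a.2)) x a) acc)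
      = vs.foldl pvStep (pvFirst2 acc) := by
  induction vs generalizing acc with
  | nil => rfl
  | cons y ys ih =>
    simp only [List.foldl_cons, ih, pvFirst2_insertBy]

-- B's loop state after the whole pass = the first two elements of A's reverse-sorted list
theorem pvFold_eq_sorted (vs : List (String × Int)) :
    vs.foldl pvStep (none, none) = pvFirst2 (PySem.List.sorted vs (fun x => x.2) true) := by
  rw [PySem.List.sorted_rev_eq_foldl_insertBy]
  rw [pvFold_first2 vs []]
  rfl

-- ===== VERDICT (by name: the statement is the Claim_ definition above) =====
theorem rank_methods_spec : Claim_equal_rank_methods := by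
  intro cvs _
  unfold Spec_rank_methods rank_methods rank_methods_alt
  by_cases h : (pvValid cvs).length < 2
  · simp [h]
  · simp only [h, if_false]
    rw [pvFold_eq_sorted]
    have hlen : (PySem.List.sorted (pvValid cvs) (fun x => x.2) true).length = (pvValid cvs).length :=
      PySem.List.length_sorted _ _ _
    match hs : PySem.List.sorted (pvValid cvs) (fun x => x.2) true with
    | [] => rw [hs] at hlen; simp at hlen; omega
    | [a] => rw [hs] at hlen; simp at hlen; omega
    | a :: b :: t => simp [pvFirst2]
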